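-- pv_equiv track=rewrite | github.com/mmzhao/corc | src/corc/tui.py | _deduplicate_agents
-- ===== SOURCE A (Python) =====
-- def _deduplicate_agents(agents: list[dict]) -> list[dict]:
--     """Filter a list of agent records to show at most one per task.
--
--     When a task has been dispatched multiple times (e.g. after a daemon
--     restart), there may be multiple agent records for the same task_id.
--     This function keeps only the best agent per task:
--
--       1. Prefer an active (non-idle) agent if one exists.
--       2. Otherwise, prefer the most recently started agent.
--
--     If agents don't have a ``task_id`` (shouldn't happen in practice),
--     they are all kept.
--
--     Returns a new list — input is not modified.
--     """
--     if len(agents) <= 1: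
--         return list(agents)
--
--     # Group by task_id
--     by_task: dict[str, list[dict]] = {}
--     no_task: list[dict] = []
--     for ag in agents:
--         tid = ag.get("task_id")
--         if tid:
--             by_task.setdefault(tid, []).append(ag)
--         else:
--             no_task.append(ag)
--
--     result: list[dict] = list(no_task)
--     for _tid, group in by_task.items():
--         if len(group) == 1:
--             result.append(group[0])
--             continue
--
--         # Prefer active (non-idle) agent
--         active = [a for a in group if a.get("status") not in (None, "idle")]
--         if active:
--             # Among active agents, pick the most recently started
--             active.sort(key=lambda a: a.get("started") or "", reverse=True)
--             result.append(active[0])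
--         else:
--             # All idle — pick the most recently started
--             group.sort(key=lambda a: a.get("started") or "", reverse=True)
--             result.append(group[0])
--
--     return result
-- ===== SOURCE B (Python) =====
-- def _deduplicate_agents(agents: list[dict]) -> list[dict]:
--     """One pass: collect task-less agents, and keep an incremental best agent
--     per task_id keyed by (is_active, started or ''), strict > so ties keep the
--     earlier agent. Returns a new list - input is not modified."""
--     no_task: list[dict] = []
--     best: dict[str, tuple] = {}  # task_id -> (key, agent)
--     for ag in agents:
--         tid = ag.get("task_id")
--         if not tid:
--             no_task.append(ag)
--             continue
--         key = (ag.get("status") not in (None, "idle"), ag.get("started") or "")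
--         cur = best.get(tid)
--         if cur is None or key > cur[0]:
--             best[tid] = (key, ag)
--     return no_task + [ag for _key, ag in best.values()]
-- ===== Notes on version B (the rewrite author's own statement) =====
-- stated objective: alternative
-- what changed: A groups all agents per task_id into lists and then, per group, filters actives and stable-reverse-sorts by start time to pick a winner; B makes a single incremental pass keeping one running best agent per task_id under the lexicographic key (is_active, started or ''), with strict > so ties keep the earlier agent, never building groups or sorting.
import Mathlib
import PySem

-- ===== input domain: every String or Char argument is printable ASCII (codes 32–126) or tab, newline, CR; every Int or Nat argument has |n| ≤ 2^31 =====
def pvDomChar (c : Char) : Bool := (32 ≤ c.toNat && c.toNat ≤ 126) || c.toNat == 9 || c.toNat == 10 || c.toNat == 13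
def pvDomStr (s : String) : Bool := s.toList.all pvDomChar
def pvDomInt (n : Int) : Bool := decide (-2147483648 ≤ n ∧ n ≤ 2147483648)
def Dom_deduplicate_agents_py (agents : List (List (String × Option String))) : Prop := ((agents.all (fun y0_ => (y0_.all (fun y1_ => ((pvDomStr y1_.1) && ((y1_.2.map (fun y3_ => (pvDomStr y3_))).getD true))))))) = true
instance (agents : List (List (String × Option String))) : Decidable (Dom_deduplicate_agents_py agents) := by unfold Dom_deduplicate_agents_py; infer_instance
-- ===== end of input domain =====

-- B replaces A's group-then-filter-and-sort passes by one incremental best-agent-per-task pass (alternative decomposition; return-value equivalence).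


-- ===== PORT A =====
-- an agent record (Python dict[str, str|None]) as an association list
abbrev pvAG : Type := List (String × Option String)

-- ag.get(k): first-match lookup; a stored None and a missing key both give None
def pvAgGet (ag : pvAG) (k : String) : Option String :=
  (List.lookup k ag).getD none

-- truthy task_id (`if tid:` — None and "" are falsy)
def pvTid (ag : pvAG) : Option String :=
  match pvAgGet ag "task_id" with
  | some t => if t = "" then none else some t
  | none => none

-- ag.get("started") or ""
def pvStarted (ag : pvAG) : String :=
  (pvAgGet ag "started").getD ""

-- ag.get("status") not in (None, "idle")
def pvActive (ag : pvAG) : Bool :=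
  match pvAgGet ag "status" with
  | some s => s != "idle"
  | none => false

def deduplicate_agents_py (agents : List (List (String × Option String))) : List (List (String × Option String)) :=
  if agents.length ≤ 1 then agents
  else
    -- group by task_id
    let st := agents.foldl
      (fun (st : PySem.Dict String (List pvAG) × List pvAG) ag =>
        match pvTid ag with
        | some t => (st.1.modify t [] (· ++ [ag]), st.2)   -- by_task.setdefault(tid, []).append(ag)
        | none => (st.1, st.2 ++ [ag]))
      (PySem.Dict.empty, [])
    -- result = list(no_task); then one winner per group
    st.1.items.foldl
      (fun res p =>
        if p.2.length == 1 then res ++ [p.2.headD []]      -- group[0] (group is nonempty by construction)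
        else
          let active := p.2.filter (fun a => pvActive a)
          if active ≠ [] then res ++ [(PySem.List.sorted active pvStarted true).headD []]
          else res ++ [(PySem.List.sorted p.2 pvStarted true).headD []])
      st.2

-- ===== PORT B =====
-- Python tuple `key > cur`: (b1, s1) > (b2, s2) iff b1 > b2, or b1 = b2 and s1 > s2
def pvKeyGT (k1 k2 : Bool × String) : Bool :=
  (k1.1 && !k2.1) || (k1.1 == k2.1 && decide (k2.2 < k1.2))

def deduplicate_agents_py_alt (agents : List (List (String × Option String))) : List (List (String × Option String)) :=
  let st := agents.foldl
    (fun (st : List pvAG × PySem.Dict String ((Bool × String) × pvAG)) ag =>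
      match pvTid ag with
      | none => (st.1 ++ [ag], st.2)
      | some t =>
        let key := (pvActive ag, pvStarted ag)
        match st.2.get? t with
        | none => (st.1, st.2.insert t (key, ag))
        | some cur => if pvKeyGT key cur.1 then (st.1, st.2.insert t (key, ag)) else st)
    ([], PySem.Dict.empty)
  st.1 ++ st.2.values.map (·.2)

-- ===== PRECONDITION & SPEC =====
def Spec_deduplicate_agents_py (agents : List (List (String × Option String))) (out : List (List (String × Option String))) : Prop := out = deduplicate_agents_py_alt agents
instance (agents : List (List (String × Option String))) (out : List (List (String × Option String))) : Decidable (Spec_deduplicate_agents_py agents out) := by unfold Spec_deduplicate_agents_py; infer_instance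

-- ===== CLAIM (what is proved, stated in full; the proofs are below) =====
def Claim_equal_deduplicate_agents_py : Prop := ∀ (agents : List (List (String × Option String))), Dom_deduplicate_agents_py agents → Spec_deduplicate_agents_py agents (deduplicate_agents_py agents)

-- ===== LEMMAS AND PROOFS =====

def pvKey (ag : pvAG) : Bool × String := (pvActive ag, pvStarted ag)

-- one reduction step of B's running best (strict >: ties keep the old agent)
def pvStepLex (m x : pvAG) : pvAG := if pvKeyGT (pvKey x) (pvKey m) then x else m
-- one step of "first element with maximal started key"
def pvStepS (m x : pvAG) : pvAG := if pvStarted m < pvStarted x then x else m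

-- the winner B keeps for a (nonempty) group
def pvFam (g : List pvAG) : pvAG := g.tail.foldl pvStepLex (g.headD [])

def pvMir (g : List pvAG) : (Bool × String) × pvAG := (pvKey (pvFam g), pvFam g)

-- B's dict reconstructed from A's group dict
def pvMirror (d : PySem.Dict String (List pvAG)) : PySem.Dict String ((Bool × String) × pvAG) :=
  ⟨d.items.map (fun p => (p.1, pvMir p.2))⟩

-- the loop bodies of the two ports, as named functions
def pvStepA (st : PySem.Dict String (List pvAG) × List pvAG) (ag : pvAG) :
    PySem.Dict String (List pvAG) × List pvAG :=
  match pvTid ag with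
  | some t => (st.1.modify t [] (· ++ [ag]), st.2)
  | none => (st.1, st.2 ++ [ag])

def pvStepB (st : List pvAG × PySem.Dict String ((Bool × String) × pvAG)) (ag : pvAG) :
    List pvAG × PySem.Dict String ((Bool × String) × pvAG) :=
  match pvTid ag with
  | none => (st.1 ++ [ag], st.2)
  | some t =>
    let key := (pvActive ag, pvStarted ag)
    match st.2.get? t with
    | none => (st.1, st.2.insert t (key, ag))
    | some cur => if pvKeyGT key cur.1 then (st.1, st.2.insert t (key, ag)) else st

lemma pv_head_foldl_insertBy (before : pvAG → pvAG → Bool) :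
    ∀ (l : List pvAG) (m : pvAG) (acc : List pvAG),
      (l.foldl (fun acc x => PySem.List.insertBy before x acc) (m :: acc)).head? =
        some (l.foldl (fun m x => if before x m then x else m) m) := by
  intro l
  induction l with
  | nil => intro m acc; simp
  | cons x l ih =>
    intro m acc
    simp only [List.foldl_cons, PySem.List.insertBy]
    split
    · exact ih x (m :: acc)
    · exact ih m (PySem.List.insertBy before x acc)

lemma pv_sorted_rev_headD (h : pvAG) (t : List pvAG) :
    (PySem.List.sorted (h :: t) pvStarted true).headD [] = t.foldl pvStepS h := by
  rw [PySem.List.sorted_rev_eq_foldl_insertBy]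
  have h1 : PySem.List.insertBy (fun a b => decide (pvStarted b < pvStarted a)) h [] = [h] := by
    simp [PySem.List.insertBy]
  simp only [List.foldl_cons, h1]
  rw [List.headD_eq_head?_getD,
    pv_head_foldl_insertBy (fun a b => decide (pvStarted b < pvStarted a)) t h []]
  simp only [Option.getD_some]
  congr 1
  funext m x
  simp [pvStepS]

lemma pv_active_stepS (m x : pvAG) (hm : pvActive m = true) (hx : pvActive x = true) :
    pvActive (pvStepS m x) = true := by
  unfold pvStepS; split <;> assumption

lemma pv_inactive_stepS (m x : pvAG) (hm : pvActive m = false) (hx : pvActive x = false) :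
    pvActive (pvStepS m x) = false := by
  unfold pvStepS; split <;> assumption

lemma pv_foldl_stepLex_split : ∀ (l : List pvAG) (x : pvAG),
    l.foldl pvStepLex x =
      if pvActive x then (l.filter (fun a => pvActive a)).foldl pvStepS x
      else
        match l.filter (fun a => pvActive a) with
        | [] => l.foldl pvStepS x
        | h :: t => t.foldl pvStepS h := by
  intro l
  induction l with
  | nil => intro x; cases hx : pvActive x <;> simp [hx]
  | cons y l ih =>
    intro x
    have hstep : pvStepLex x y =
        if pvActive x = pvActive y then pvStepS x y
        else if pvActive y then y else x := by
      unfold pvStepLex pvStepS pvKeyGT pvKey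
      cases hx : pvActive x <;> cases hy : pvActive y <;> simp
    cases hx : pvActive x <;> cases hy : pvActive y <;>
      simp only [List.foldl_cons, List.filter_cons, hy, hstep, hx, Bool.false_eq_true,
        Bool.true_eq_false, if_true, if_false, reduceIte]
    · -- x inactive, y inactive
      rw [ih (pvStepS x y), pv_inactive_stepS x y hx hy]
      cases hf : l.filter (fun a => pvActive a) <;> simp [hf]
    · -- x inactive, y active
      rw [ih y, hy]
      simp
    · -- x active, y inactive
      rw [ih x, hx]
      simp
    · -- x active, y active
      rw [ih (pvStepS x y), pv_active_stepS x y hx hy]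
      simp

lemma pv_pick_eq_fam (g : List pvAG) (hg : g ≠ []) :
    (if g.length == 1 then g.headD []
     else if g.filter (fun a => pvActive a) ≠ [] then
       (PySem.List.sorted (g.filter (fun a => pvActive a)) pvStarted true).headD []
     else (PySem.List.sorted g pvStarted true).headD []) = pvFam g := by
  obtain ⟨h, t, rfl⟩ : ∃ h t, g = h :: t := by
    cases g with
    | nil => exact absurd rfl hg
    | cons h t => exact ⟨h, t, rfl⟩
  cases t with
  | nil => simp [pvFam]
  | cons y t =>
    have hlen : ((h :: y :: t).length == 1) = false := by simp
    rw [hlen]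
    simp only [Bool.false_eq_true, if_false, pvFam, List.tail_cons, List.headD_cons]
    rw [pv_foldl_stepLex_split (y :: t) h]
    cases hh : pvActive h with
    | true =>
      have hfil : (h :: y :: t).filter (fun a => pvActive a) =
          h :: (y :: t).filter (fun a => pvActive a) := by simp [List.filter_cons, hh]
      rw [hfil]
      simp only [if_true, reduceCtorEq, ne_eq, not_false_iff, if_pos, hh]
      rw [pv_sorted_rev_headD]
    | false =>
      have hfil : (h :: y :: t).filter (fun a => pvActive a) =
          (y :: t).filter (fun a => pvActive a) := by simp [List.filter_cons, hh]
      rw [hfil]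
      simp only [hh, Bool.false_eq_true, if_false]
      cases hf : (y :: t).filter (fun a => pvActive a) with
      | nil => rw [if_neg (by simp), pv_sorted_rev_headD]
      | cons a as => rw [if_pos (by simp), pv_sorted_rev_headD]

lemma pv_fam_append (g : List pvAG) (a : pvAG) (hg : g ≠ []) :
    pvFam (g ++ [a]) = if pvKeyGT (pvKey a) (pvKey (pvFam g)) then a else pvFam g := by
  obtain ⟨h, t, rfl⟩ : ∃ h t, g = h :: t := by
    cases g with
    | nil => exact absurd rfl hg
    | cons h t => exact ⟨h, t, rfl⟩
  simp [pvFam, pvStepLex, List.foldl_append]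

lemma pv_mirror_contains (d : PySem.Dict String (List pvAG)) (t : String) :
    (pvMirror d).contains t = d.contains t := by
  rw [PySem.Dict.contains_eq_decide_mem_keys, PySem.Dict.contains_eq_decide_mem_keys]
  have : (pvMirror d).keys = d.keys := by
    simp [pvMirror, PySem.Dict.keys, List.map_map, Function.comp_def]
  rw [this]

lemma pv_mirror_nodup (d : PySem.Dict String (List pvAG)) (hnd : d.keys.Nodup) :
    (pvMirror d).keys.Nodup := by
  have : (pvMirror d).keys = d.keys := by
    simp [pvMirror, PySem.Dict.keys, List.map_map, Function.comp_def]
  rw [this]; exact hnd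

lemma pv_mirror_get?_none (d : PySem.Dict String (List pvAG)) (t : String)
    (hc : d.contains t = false) : (pvMirror d).get? t = none := by
  rw [PySem.Dict.get?_eq_none_iff_contains]
  rw [pv_mirror_contains, hc]

lemma pv_mirror_get?_some (d : PySem.Dict String (List pvAG)) (t : String) (g : List pvAG)
    (hnd : d.keys.Nodup) (hm : (t, g) ∈ d.items) : (pvMirror d).get? t = some (pvMir g) := by
  apply PySem.Dict.get?_of_mem_items
  · exact List.mem_map.mpr ⟨(t, g), hm, rfl⟩
  · exact pv_mirror_nodup d hnd

lemma pv_entry_eq (d : PySem.Dict String (List pvAG)) (hnd : d.keys.Nodup)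
    {p : String × List pvAG} (hp : p ∈ d.items) {t : String} (hpt : p.1 = t)
    {g : List pvAG} (hget : d.get? t = some g) : p = (t, g) := by
  have h1 : d.getD p.1 [] = p.2 := PySem.Dict.getD_of_mem_items d hp hnd []
  have h2 : d.getD t [] = g := PySem.Dict.getD_of_get?_eq_some d [] hget
  rw [hpt] at h1
  exact Prod.ext hpt (h1.symm.trans h2)

lemma pv_step_commute (d : PySem.Dict String (List pvAG)) (nt : List pvAG) (ag : pvAG)
    (hnd : d.keys.Nodup) (hne : ∀ p ∈ d.items, p.2 ≠ []) :
    pvStepB (nt, pvMirror d) ag = ((pvStepA (d, nt) ag).2, pvMirror (pvStepA (d, nt) ag).1) ∧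
    (pvStepA (d, nt) ag).1.keys.Nodup ∧
    (∀ p ∈ (pvStepA (d, nt) ag).1.items, p.2 ≠ []) := by
  cases htid : pvTid ag with
  | none =>
    have h : pvStepA (d, nt) ag = (d, nt ++ [ag]) := by simp [pvStepA, htid]
    rw [h]
    exact ⟨by simp [pvStepB, htid], hnd, hne⟩
  | some t =>
    have hstA : pvStepA (d, nt) ag = (d.insert t (d.getD t [] ++ [ag]), nt) := by
      simp [pvStepA, htid, PySem.Dict.modify]
    rw [hstA]
    cases hc : d.contains t with
    | false =>
      have hgd : d.getD t [] = [] := PySem.Dict.getD_of_not_contains d [] hc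
      have hB : pvStepB (nt, pvMirror d) ag =
          (nt, (pvMirror d).insert t ((pvActive ag, pvStarted ag), ag)) := by
        simp [pvStepB, htid, pv_mirror_get?_none d t hc]
      have hmc : (pvMirror d).contains t = false := by rw [pv_mirror_contains, hc]
      refine ⟨?_, ?_, ?_⟩
      · rw [hB, hgd]
        simp only [List.nil_append]
        refine Prod.ext rfl ?_
        show (pvMirror d).insert t ((pvActive ag, pvStarted ag), ag) = pvMirror (d.insert t [ag])
        apply PySem.Dict.ext
        rw [PySem.Dict.items_insert_of_not_contains _ _ hmc]
        show _ = (d.insert t [ag]).items.map _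
        rw [PySem.Dict.items_insert_of_not_contains d [ag] hc]
        simp [pvMirror, pvMir, pvFam, pvKey]
      · rw [hgd]
        simp only [List.nil_append]
        show (d.insert t [ag]).keys.Nodup
        rw [PySem.Dict.keys_insert_of_not_contains d [ag] hc]
        have ht : t ∉ d.keys := fun hmem =>
          absurd ((PySem.Dict.contains_iff_mem_keys d t).mpr hmem) (by rw [hc]; simp)
        exact List.Nodup.append hnd (List.nodup_singleton _)
          (fun a ha hb => ht ((List.mem_singleton.mp hb) ▸ ha))
      · intro p hp
        rw [hgd] at hp
        simp only [List.nil_append] at hp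
        rw [show (d.insert t [ag]).items = d.items ++ [(t, [ag])] from
          PySem.Dict.items_insert_of_not_contains d [ag] hc] at hp
        rcases List.mem_append.mp hp with h | h
        · exact hne p h
        · simp at h; rw [h]; simp
    | true =>
      obtain ⟨g, hget⟩ : ∃ g, d.get? t = some g := by
        have := PySem.Dict.contains_eq_isSome_get? d t
        rw [hc] at this
        exact Option.isSome_iff_exists.mp this.symm
      have hgd : d.getD t [] = g := PySem.Dict.getD_of_get?_eq_some d [] hget
      have hmem : (t, g) ∈ d.items := PySem.Dict.mem_items_of_get?_eq_some d hget
      have hgne : g ≠ [] := hne _ hmem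
      have hmg : (pvMirror d).get? t = some (pvMir g) := pv_mirror_get?_some d t g hnd hmem
      have hitems : (d.insert t (g ++ [ag])).items =
          d.items.map (fun p => if p.1 == t then (t, g ++ [ag]) else p) :=
        PySem.Dict.items_insert_of_contains d (g ++ [ag]) hc
      have hkey : ((pvActive ag, pvStarted ag) : Bool × String) = pvKey ag := rfl
      have hfam := pv_fam_append g ag hgne
      have hnd' : (d.insert t (g ++ [ag])).keys.Nodup := by
        rw [PySem.Dict.keys_insert_of_contains d (g ++ [ag]) hc]; exact hnd
      have hne' : ∀ p ∈ (d.insert t (g ++ [ag])).items, p.2 ≠ [] := by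
        intro p hp
        rw [hitems] at hp
        obtain ⟨q, hq, rfl⟩ := List.mem_map.mp hp
        by_cases hqt : (q.1 == t) = true
        · simp only [hqt, if_true]; simp
        · simp only [hqt]; simp only [Bool.false_eq_true, if_false] at *
          exact hne q hq
      rw [hgd]
      refine ⟨?_, hnd', hne'⟩
      have hBs : pvStepB (nt, pvMirror d) ag =
          if pvKeyGT (pvKey ag) (pvKey (pvFam g)) then
            (nt, (pvMirror d).insert t (pvKey ag, ag))
          else (nt, pvMirror d) := by
        simp only [pvStepB, htid, hmg, hkey, pvMir]
      cases hcmp : pvKeyGT (pvKey ag) (pvKey (pvFam g)) with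
      | true =>
        rw [hBs, hcmp, if_pos rfl]
        refine Prod.ext rfl ?_
        apply PySem.Dict.ext
        have hmcT : (pvMirror d).contains t = true := by rw [pv_mirror_contains, hc]
        show ((pvMirror d).insert t (pvKey ag, ag)).items = _
        rw [PySem.Dict.items_insert_of_contains _ (pvKey ag, ag) hmcT]
        show ((d.items.map fun p => (p.1, pvMir p.2)).map fun p => if p.1 == t then (t, (pvKey ag, ag)) else p)
            = (d.insert t (g ++ [ag])).items.map fun p => (p.1, pvMir p.2)
        rw [hitems, List.map_map, List.map_map]
        apply List.map_congr_left
        intro p hp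
        by_cases hpt : p.1 = t
        · have hpg : p = (t, g) := pv_entry_eq d hnd hp hpt hget
          subst hpg
          simp only [Function.comp_apply, beq_self_eq_true, if_true, beq_iff_eq, hpt, reduceIte]
          rw [pvMir, hfam, hcmp, if_pos rfl]
        · simp [hpt]
      | false =>
        rw [hBs, hcmp, if_neg (by simp)]
        refine Prod.ext rfl ?_
        apply PySem.Dict.ext
        show (d.items.map fun p => (p.1, pvMir p.2)) = (d.insert t (g ++ [ag])).items.map fun p => (p.1, pvMir p.2)
        rw [hitems, List.map_map]
        symm
        apply List.map_congr_left
        intro p hp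
        by_cases hpt : p.1 = t
        · have hpg : p = (t, g) := pv_entry_eq d hnd hp hpt hget
          subst hpg
          simp only [Function.comp_apply, beq_self_eq_true, if_true, reduceIte]
          rw [pvMir, pvMir, hfam, hcmp, if_neg (by simp)]
        · simp [hpt]

lemma pv_loop_inv : ∀ (agents : List pvAG) (d : PySem.Dict String (List pvAG)) (nt : List pvAG),
    d.keys.Nodup → (∀ p ∈ d.items, p.2 ≠ []) →
    agents.foldl pvStepB (nt, pvMirror d) =
      ((agents.foldl pvStepA (d, nt)).2, pvMirror (agents.foldl pvStepA (d, nt)).1) ∧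
    (agents.foldl pvStepA (d, nt)).1.keys.Nodup ∧
    (∀ p ∈ (agents.foldl pvStepA (d, nt)).1.items, p.2 ≠ []) := by
  intro agents
  induction agents with
  | nil => intro d nt hnd hne; exact ⟨rfl, hnd, hne⟩
  | cons ag rest ih =>
    intro d nt hnd hne
    obtain ⟨h1, h2, h3⟩ := pv_step_commute d nt ag hnd hne
    simp only [List.foldl_cons]
    obtain ⟨d', nt', hA⟩ : ∃ d' nt', pvStepA (d, nt) ag = (d', nt') :=
      ⟨_, _, rfl⟩
    rw [hA] at h1 h2 h3 ⊢
    rw [h1]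
    exact ih d' nt' h2 h3

-- ===== VERDICT (by name: the statement is the Claim_ definition above) =====
theorem deduplicate_agents_py_spec : Claim_equal_deduplicate_agents_py := by
  intro agents _
  unfold Spec_deduplicate_agents_py deduplicate_agents_py deduplicate_agents_py_alt
  by_cases hlen : agents.length ≤ 1
  · rw [if_pos hlen]
    match agents, hlen with
    | [], _ => rfl
    | [a], _ =>
      simp only [List.foldl_cons, List.foldl_nil]
      cases h : pvTid a with
      | none => simp [PySem.Dict.values, PySem.Dict.empty, h]
      | some t =>
        simp only [h, PySem.Dict.get?_empty]
        have : (PySem.Dict.empty : PySem.Dict String ((Bool × String) × pvAG)).contains t = false := by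
          simp [PySem.Dict.contains_empty]
        simp only [PySem.Dict.values, PySem.Dict.items_insert_of_not_contains _ _ this]
        simp [PySem.Dict.empty]
  · rw [if_neg hlen]
    have hinv := pv_loop_inv agents PySem.Dict.empty []
      (by simp [PySem.Dict.nodup_keys_empty]) (by simp [PySem.Dict.empty])
    obtain ⟨h1, _, h3⟩ := hinv
    have hBfold : agents.foldl
        (fun (st : List pvAG × PySem.Dict String ((Bool × String) × pvAG)) ag =>
          match pvTid ag with
          | none => (st.1 ++ [ag], st.2)
          | some t =>
            let key := (pvActive ag, pvStarted ag)
            match st.2.get? t with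
            | none => (st.1, st.2.insert t (key, ag))
            | some cur => if pvKeyGT key cur.1 then (st.1, st.2.insert t (key, ag)) else st)
        ([], PySem.Dict.empty) = agents.foldl pvStepB ([], pvMirror PySem.Dict.empty) := rfl
    have hAfold : agents.foldl
        (fun (st : PySem.Dict String (List pvAG) × List pvAG) ag =>
          match pvTid ag with
          | some t => (st.1.modify t [] (· ++ [ag]), st.2)
          | none => (st.1, st.2 ++ [ag]))
        (PySem.Dict.empty, []) = agents.foldl pvStepA (PySem.Dict.empty, []) := rfl
    rw [hBfold, hAfold, h1]
    set F := agents.foldl pvStepA (PySem.Dict.empty, []) with hF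
    -- A's result loop appends exactly one winner per group
    have hbody : ∀ (res : List pvAG) (p : String × List pvAG),
        (if p.2.length == 1 then res ++ [p.2.headD []]
         else
           let active := p.2.filter (fun a => pvActive a)
           if active ≠ [] then res ++ [(PySem.List.sorted active pvStarted true).headD []]
           else res ++ [(PySem.List.sorted p.2 pvStarted true).headD []]) =
        res ++ [if p.2.length == 1 then p.2.headD []
                else if p.2.filter (fun a => pvActive a) ≠ [] then
                  (PySem.List.sorted (p.2.filter (fun a => pvActive a)) pvStarted true).headD []
                else (PySem.List.sorted p.2 pvStarted true).headD []] := by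
      intro res p
      show (if p.2.length == 1 then res ++ [p.2.headD []]
            else if p.2.filter (fun a => pvActive a) ≠ [] then
              res ++ [(PySem.List.sorted (p.2.filter (fun a => pvActive a)) pvStarted true).headD []]
            else res ++ [(PySem.List.sorted p.2 pvStarted true).headD []]) = _
      split_ifs <;> rfl
    calc F.1.items.foldl
          (fun res p =>
            if p.2.length == 1 then res ++ [p.2.headD []]
            else
              let active := p.2.filter (fun a => pvActive a)
              if active ≠ [] then res ++ [(PySem.List.sorted active pvStarted true).headD []]
              else res ++ [(PySem.List.sorted p.2 pvStarted true).headD []]) F.2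
        = F.1.items.foldl (fun res p => res ++
            [if p.2.length == 1 then p.2.headD []
             else if p.2.filter (fun a => pvActive a) ≠ [] then
               (PySem.List.sorted (p.2.filter (fun a => pvActive a)) pvStarted true).headD []
             else (PySem.List.sorted p.2 pvStarted true).headD []]) F.2 := by
          exact List.foldl_ext _ _ _ (fun res p _ => hbody res p)
      _ = F.2 ++ F.1.items.map (fun p =>
            if p.2.length == 1 then p.2.headD []
            else if p.2.filter (fun a => pvActive a) ≠ [] then
              (PySem.List.sorted (p.2.filter (fun a => pvActive a)) pvStarted true).headD []
            else (PySem.List.sorted p.2 pvStarted true).headD []) :=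
          PySem.List.foldl_append_singleton_eq_map _ _ _
      _ = F.2 ++ F.1.items.map (fun p => pvFam p.2) := by
          congr 1
          apply List.map_congr_left
          intro p hp
          exact pv_pick_eq_fam p.2 (h3 p hp)
      _ = F.2 ++ (pvMirror F.1).values.map (fun x => x.2) := by
          simp [pvMirror, PySem.Dict.values, List.map_map, Function.comp_def, pvMir]
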